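-- pv_equiv track=rewrite | github.com/cnthornton/REM | REM/configuration.py | format_date_element
-- ===== SOURCE A (Python) =====
-- def format_date_element(date_str):
--     """
--     Forces user input to date element to be in ISO format.
--     """
--     buff = []
--     for index, char in enumerate(date_str):
--         if index == 3:
--             if len(date_str) != 4:
--                 buff.append('{}-'.format(char))
--             else:
--                 buff.append(char)
--         elif index == 5:
--             if len(date_str) != 6:
--                 buff.append('{}-'.format(char))
--             else:
--                 buff.append(char)
--         else:
--             buff.append(char)
--
--     return (''.join(buff))
-- ===== SOURCE B (Python) =====
-- def format_date_element(date_str):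
--     """
--     Forces user input to date element to be in ISO format.
--     """
--     n = len(date_str)
--     if n >= 7:
--         return date_str[:4] + '-' + date_str[4:6] + '-' + date_str[6:]
--     elif n >= 5:
--         return date_str[:4] + '-' + date_str[4:]
--     else:
--         return date_str
-- ===== Notes on version B (the rewrite author's own statement) =====
-- stated objective: simpler
-- what changed: Replaced the char-by-char enumerate loop with index guards by three conditional slice concatenations chosen by the string length.
import Mathlib
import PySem

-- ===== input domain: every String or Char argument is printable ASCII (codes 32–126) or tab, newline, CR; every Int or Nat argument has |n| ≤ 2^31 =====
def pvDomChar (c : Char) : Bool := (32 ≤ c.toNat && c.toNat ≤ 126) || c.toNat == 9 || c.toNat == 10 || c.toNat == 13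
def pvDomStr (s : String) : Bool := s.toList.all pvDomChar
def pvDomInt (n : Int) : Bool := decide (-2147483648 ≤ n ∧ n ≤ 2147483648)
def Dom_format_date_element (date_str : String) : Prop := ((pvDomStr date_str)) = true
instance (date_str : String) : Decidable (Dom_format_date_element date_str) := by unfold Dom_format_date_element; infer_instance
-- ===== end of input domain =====

-- B replaces A's char-by-char loop with three conditional slice concatenations (objective: simpler).

-- ===== PORT A =====
-- the enumerate loop: i is the index, n = len(date_str), buff the accumulator
def fdeLoop (n : Nat) : Nat → List Char → List Char → List Char
  | _, [], buff => buff
  | i, c :: rest, buff =>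
    if i = 3 then
      (if n ≠ 4 then fdeLoop n (i + 1) rest (buff ++ [c, '-'])
       else fdeLoop n (i + 1) rest (buff ++ [c]))
    else if i = 5 then
      (if n ≠ 6 then fdeLoop n (i + 1) rest (buff ++ [c, '-'])
       else fdeLoop n (i + 1) rest (buff ++ [c]))
    else fdeLoop n (i + 1) rest (buff ++ [c])

def format_date_element (date_str : String) : String :=
  String.ofList (fdeLoop date_str.toList.length 0 date_str.toList [])

-- ===== PORT B =====
def format_date_element_alt (date_str : String) : String :=
  let cs := date_str.toList
  let n := PySem.Chars.len cs
  if 7 ≤ n then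
    String.ofList (PySem.List.slice cs none (some 4) ++ ['-'] ++
      PySem.List.slice cs (some 4) (some 6) ++ ['-'] ++ PySem.List.slice cs (some 6) none)
  else if 5 ≤ n then
    String.ofList (PySem.List.slice cs none (some 4) ++ ['-'] ++ PySem.List.slice cs (some 4) none)
  else date_str

-- ===== PRECONDITION & SPEC =====
def Spec_format_date_element (date_str : String) (out : String) : Prop := out = format_date_element_alt date_str
instance (date_str : String) (out : String) : Decidable (Spec_format_date_element date_str out) := by unfold Spec_format_date_element; infer_instance

-- ===== CLAIM (what is proved, stated in full; the proofs are below) =====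
def Claim_equal_format_date_element : Prop := ∀ (date_str : String), Dom_format_date_element date_str → Spec_format_date_element date_str (format_date_element date_str)

-- ===== LEMMAS AND PROOFS =====

-- past index 5 the loop only appends the remaining characters
lemma fdeLoop_high (n : Nat) (l : List Char) (i : Nat) (b : List Char) (h : 6 ≤ i) :
    fdeLoop n i l b = b ++ l := by
  induction l generalizing i b with
  | nil => simp [fdeLoop]
  | cons c t ih =>
      have h3 : i ≠ 3 := by omega
      have h5 : i ≠ 5 := by omega
      simp [fdeLoop, h3, h5, ih (i + 1) (b ++ [c]) (by omega)]

-- list-level characterisation: the loop's output equals B's slice concatenation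
lemma fde_eq (cs : List Char) :
    fdeLoop cs.length 0 cs [] =
      (if 7 ≤ PySem.Chars.len cs then
        PySem.List.slice cs none (some 4) ++ ['-'] ++
          PySem.List.slice cs (some 4) (some 6) ++ ['-'] ++ PySem.List.slice cs (some 6) none
      else if 5 ≤ PySem.Chars.len cs then
        PySem.List.slice cs none (some 4) ++ ['-'] ++ PySem.List.slice cs (some 4) none
      else cs) := by
  match cs with
  | [] => rfl
  | [a] => rfl
  | [a, b] => rfl
  | [a, b, c] => rfl
  | [a, b, c, d] => rfl
  | [a, b, c, d, e] =>
      rfl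
  | [a, b, c, d, e, f] =>
      rfl
  | a :: b :: c :: d :: e :: f :: g :: t =>
      have h7 : (7 : Int) ≤ PySem.Chars.len (a :: b :: c :: d :: e :: f :: g :: t) := by
        simp [PySem.Chars.len]
        push_cast
        omega
      have hlen : (a :: b :: c :: d :: e :: f :: g :: t).length = t.length + 7 := by simp
      have h4 : t.length + 7 ≠ 4 := by omega
      have h6 : t.length + 7 ≠ 6 := by omega
      rw [if_pos h7, hlen]
      simp [fdeLoop, h4, h6, fdeLoop_high (t.length + 7) t 7 _ (by omega),
        PySem.List.slice, PySem.List.clampIdx]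

-- ===== VERDICT (by name: the statement is the Claim_ definition above) =====
theorem format_date_element_spec : Claim_equal_format_date_element := by
  intro s _
  unfold Spec_format_date_element format_date_element format_date_element_alt
  dsimp only
  have hmk : String.ofList s.toList = s := by simp [String.ofList]
  rw [fde_eq s.toList]
  split_ifs with h1 h2
  · rfl
  · rfl
  · exact hmk
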